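-- pv_equiv track=rewrite | github.com/solo21-12/A2SV_Progress | contest/B_Grid_Path.py | solve
-- ===== SOURCE A (Python) =====
-- def solve(i, j, dp, row, col, k):
--     if (i, j) == (row - 1, col - 1) and k == 0:
--
--         return True
--     elif i >= row or j >= col:
--         return False
--     elif dp[i][j] != -1:
--         return dp[i][j]
--
--     right = solve(i, j + 1, dp, row, col, k - (i + 1))
--     bottom = solve(i + 1, j, dp, row, col, k - (j + 1))
--     dp[i][j] = right or bottom
--     return dp[i][j]
-- ===== SOURCE B (Python) =====
-- def solve(i, j, dp, row, col, k):
--     # Closed form: the fuel consumed on any monotone path from (i, j) to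
--     # (row-1, col-1) is path-independent and equals row*col - (i+1)*(j+1),
--     # so the search succeeds exactly when k equals that amount.
--     # (dp is unused: return-value equivalence only; A mutates dp, B does not.)
--     if i >= row or j >= col:
--         return False
--     return k == row * col - (i + 1) * (j + 1)
-- ===== Notes on version B (the rewrite author's own statement) =====
-- stated objective: simpler
-- what changed: Replaced the memoized two-way recursion over the grid by the closed form k == row*col-(i+1)*(j+1), valid because the fuel consumed on any monotone path from (i,j) to the corner is path-independent; B also does not mutate dp (return-value equivalence only).
-- outside the precondition, e.g. on solve(0, 0, [[5]], 1, 1, 3): A returns 5, B returns False; on solve(-1, 0, [[-1]], 1, 1, 1): A returns True, B returns True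
import Mathlib
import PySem

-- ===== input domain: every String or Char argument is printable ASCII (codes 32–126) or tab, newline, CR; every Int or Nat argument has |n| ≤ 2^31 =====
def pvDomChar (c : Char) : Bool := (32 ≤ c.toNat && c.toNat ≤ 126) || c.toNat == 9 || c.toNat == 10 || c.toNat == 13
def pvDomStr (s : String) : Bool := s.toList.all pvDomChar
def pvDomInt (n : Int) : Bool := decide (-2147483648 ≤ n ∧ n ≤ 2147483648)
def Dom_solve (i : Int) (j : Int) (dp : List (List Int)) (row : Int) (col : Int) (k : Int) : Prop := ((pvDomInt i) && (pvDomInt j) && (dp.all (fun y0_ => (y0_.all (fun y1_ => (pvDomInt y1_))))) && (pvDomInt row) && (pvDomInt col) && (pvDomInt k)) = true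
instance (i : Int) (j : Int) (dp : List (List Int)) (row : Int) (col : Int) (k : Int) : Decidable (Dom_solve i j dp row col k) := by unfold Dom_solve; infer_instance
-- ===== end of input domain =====

-- B replaces A's memoized recursion by the closed form k = row*col-(i+1)*(j+1)
-- (path-independent fuel consumption); A mutates dp, B does not — equivalence is about the return value only.

-- ===== PORT A =====
-- A mutates dp (memoization), so the port threads the dp state explicitly and
-- `solve` projects the returned value.  Python stores booleans True/False into
-- the int matrix; they are encoded as 1/0 (exact: True == 1, False == 0 in Python),
-- and `return dp[i][j]` on a stored boolean is decoded as `v ≠ 0`.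
-- dp[i][j] out of range = IndexError → the `none` branch (excluded by Pre_solve).
def pvSet2 (dp : List (List Int)) (i j : Nat) (v : Int) : List (List Int) :=
  dp.set i ((dp.getD i []).set j v)

def solveA (i : Int) (j : Int) (dp : List (List Int)) (row : Int) (col : Int) (k : Int) : Bool × List (List Int) :=
  if i = row - 1 ∧ j = col - 1 ∧ k = 0 then (true, dp)
  else if h2 : row ≤ i ∨ col ≤ j then (false, dp)
  else
    match (PySem.List.pyGet? dp i).bind (fun r => PySem.List.pyGet? r j) with
    | none => (false, dp)  -- Python raises IndexError here; outside Pre_solve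
    | some v =>
      if v ≠ -1 then (decide (v ≠ 0), dp)
      else
        let p1 := solveA i (j + 1) dp row col (k - (i + 1))
        let p2 := solveA (i + 1) j p1.2 row col (k - (j + 1))
        let res := p1.1 || p2.1
        (res, pvSet2 p2.2 i.toNat j.toNat (if res then 1 else 0))
termination_by ((row - i).toNat + (col - j).toNat)
decreasing_by all_goals omega

def solve (i : Int) (j : Int) (dp : List (List Int)) (row : Int) (col : Int) (k : Int) : Bool :=
  (solveA i j dp row col k).1

-- ===== PORT B =====
def solve_alt (i : Int) (j : Int) (dp : List (List Int)) (row : Int) (col : Int) (k : Int) : Bool :=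
  if row ≤ i ∨ col ≤ j then false
  else decide (k = row * col - (i + 1) * (j + 1))

-- ===== PRECONDITION & SPEC =====
-- Pre_ excludes in-grid calls with a negative index (Python's negative-index
-- wraparound, or an IndexError) or with a dp that is not a row×col matrix of -1s
-- (a memo hit then returns the stored int — not a Bool — and dp rows can be too
-- short, raising IndexError).  Out-of-grid calls are admitted for any dp.
def Pre_solve (i : Int) (j : Int) (dp : List (List Int)) (row : Int) (col : Int) (k : Int) : Prop :=
  (row ≤ i ∨ col ≤ j) ∨
  (0 ≤ i ∧ 0 ≤ j ∧ (dp.length : Int) = row ∧ ∀ r ∈ dp, (r.length : Int) = col ∧ ∀ v ∈ r, v = -1)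
instance (i : Int) (j : Int) (dp : List (List Int)) (row : Int) (col : Int) (k : Int) : Decidable (Pre_solve i j dp row col k) := by unfold Pre_solve; infer_instance
def pvWitness_solve : Int × Int × List (List Int) × Int × Int × Int := (0, 0, [[-1, -1], [-1, -1]], 2, 2, 3)

def Spec_solve (i : Int) (j : Int) (dp : List (List Int)) (row : Int) (col : Int) (k : Int) (out : Bool) : Prop := out = solve_alt i j dp row col k
instance (i : Int) (j : Int) (dp : List (List Int)) (row : Int) (col : Int) (k : Int) (out : Bool) : Decidable (Spec_solve i j dp row col k out) := by unfold Spec_solve; infer_instance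

-- ===== CLAIM (what is proved, stated in full; the proofs are below) =====
def Claim_equal_solve : Prop := ∀ (i : Int) (j : Int) (dp : List (List Int)) (row : Int) (col : Int) (k : Int), Dom_solve i j dp row col k → Pre_solve i j dp row col k → Spec_solve i j dp row col k (solve i j dp row col k)

-- ===== LEMMAS AND PROOFS =====

-- Invariant: dp is a row×col matrix whose entries are -1 or the encoding of the
-- one boolean b that every cell of this search evaluates to.
def InvD (row col : Int) (b : Bool) (dp : List (List Int)) : Prop :=
  (dp.length : Int) = row ∧ ∀ r ∈ dp, (r.length : Int) = col ∧ ∀ v ∈ r, v = -1 ∨ v = (if b then 1 else 0)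

lemma InvD_set (row col : Int) (b : Bool) (dp : List (List Int)) (i j : Nat)
    (hi : i < dp.length)
    (h : InvD row col b dp) : InvD row col b (pvSet2 dp i j (if b then 1 else 0)) := by
  obtain ⟨hlen, hrows⟩ := h
  refine ⟨by simpa [pvSet2] using hlen, ?_⟩
  intro r hr
  rcases List.mem_or_eq_of_mem_set hr with hr' | rfl
  · exact hrows r hr'
  · have hmem : dp.getD i [] ∈ dp := by
      rw [List.getD_eq_getElem dp [] hi]; exact List.getElem_mem hi
    obtain ⟨hl, hv⟩ := hrows _ hmem
    refine ⟨by simpa using hl, ?_⟩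
    intro v hv'
    rcases List.mem_or_eq_of_mem_set hv' with h' | rfl
    · exact hv v h'
    · right; rfl

lemma solveA_main (row col : Int) (b : Bool) :
    ∀ n : Nat, ∀ i j : Int, ∀ dp : List (List Int), ∀ k : Int,
      (row - i).toNat + (col - j).toNat ≤ n → 0 ≤ i → 0 ≤ j →
      InvD row col b dp →
      b = decide (k = row * col - (i + 1) * (j + 1)) →
      (solveA i j dp row col k).1 = (if row ≤ i ∨ col ≤ j then false else b) ∧
      InvD row col b (solveA i j dp row col k).2 := by
  intro n
  induction n with
  | zero =>
    intro i j dp k hn hi hj hinv hb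
    have hout : row ≤ i ∨ col ≤ j := by omega
    have hne : ¬ (i = row - 1 ∧ j = col - 1 ∧ k = 0) := by omega
    rw [solveA, if_neg hne, dif_pos hout]
    exact ⟨by simp [hout], hinv⟩
  | succ n ih =>
    intro i j dp k hn hi hj hinv hb
    rw [solveA]
    by_cases h1 : i = row - 1 ∧ j = col - 1 ∧ k = 0
    · obtain ⟨e1, e2, e3⟩ := h1
      have hout : ¬ (row ≤ i ∨ col ≤ j) := by omega
      have hbtrue : b = true := by
        rw [hb, decide_eq_true_iff]; subst e1 e2 e3; ring
      rw [if_pos ⟨e1, e2, e3⟩]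
      exact ⟨by simp [hout, hbtrue], hinv⟩
    · simp only [if_neg h1]
      by_cases h2 : row ≤ i ∨ col ≤ j
      · simp only [dif_pos h2]
        exact ⟨by simp [h2], hinv⟩
      · simp only [dif_neg h2]
        have hir : i < row := by omega
        have hjc : j < col := by omega
        obtain ⟨hlen, hrows⟩ := hinv
        have hilt : i.toNat < dp.length := by omega
        have hg1 : PySem.List.pyGet? dp i = some dp[i.toNat] :=
          PySem.List.pyGet?_eq_some_getElem dp hi (by omega)
        have hrmem : dp[i.toNat] ∈ dp := List.getElem_mem hilt
        obtain ⟨hrl, hrv⟩ := hrows _ hrmem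
        have hjlt : j.toNat < dp[i.toNat].length := by omega
        have hg2 : PySem.List.pyGet? dp[i.toNat] j = some dp[i.toNat][j.toNat] :=
          PySem.List.pyGet?_eq_some_getElem dp[i.toNat] hj (by omega)
        have hvv := hrv _ (List.getElem_mem hjlt)
        rw [hg1]
        simp only [Option.bind_some]
        rw [hg2]
        set v := dp[i.toNat][j.toNat] with hv
        dsimp only
        by_cases hvm : v ≠ -1
        · -- memo hit: v = enc b
          have hvb : v = (if b then 1 else 0) := by tauto
          rw [if_pos hvm]
          refine ⟨?_, ⟨hlen, hrows⟩⟩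
          rw [if_neg h2]
          show decide (v ≠ 0) = b
          rw [hvb]; cases b <;> simp
        · rw [if_neg hvm]
          -- recursive case
          have hb1 : b = decide (k - (i + 1) = row * col - (i + 1) * (j + 1 + 1)) := by
            rw [hb]; simp only [decide_eq_decide]; constructor <;> intro h <;> nlinarith
          have hb2 : b = decide (k - (j + 1) = row * col - (i + 1 + 1) * (j + 1)) := by
            rw [hb]; simp only [decide_eq_decide]; constructor <;> intro h <;> nlinarith
          obtain ⟨r1, I1⟩ := ih i (j + 1) dp (k - (i + 1)) (by omega) hi (by omega) ⟨hlen, hrows⟩ hb1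
          obtain ⟨r2, I2⟩ := ih (i + 1) j (solveA i (j + 1) dp row col (k - (i + 1))).2
            (k - (j + 1)) (by omega) (by omega) hj I1 hb2
          have hres : ((solveA i (j + 1) dp row col (k - (i + 1))).1 ||
              (solveA (i + 1) j (solveA i (j + 1) dp row col (k - (i + 1))).2 row col (k - (j + 1))).1) = b := by
            rw [r1, r2]
            have hnj : ¬ col ≤ j := by omega
            have hni : ¬ row ≤ i := by omega
            by_cases hc1 : col ≤ j + 1 <;> by_cases hc2 : row ≤ i + 1
            · -- both children out of grid: i = row-1, j = col-1, k ≠ 0 → b = false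
              have e1 : i = row - 1 := by omega
              have e2 : j = col - 1 := by omega
              have hk0 : k ≠ 0 := fun hk => h1 ⟨e1, e2, hk⟩
              have hbf : b = false := by
                rw [hb]; simp only [decide_eq_false_iff_not]
                intro hkk; apply hk0; subst e1 e2; nlinarith
              simp [hc1, hc2, hbf]
            · rw [if_pos (Or.inr hc1), if_neg (by omega : ¬ (row ≤ i + 1 ∨ col ≤ j))]
              simp
            · rw [if_neg (by omega : ¬ (row ≤ i ∨ col ≤ j + 1)), if_pos (Or.inl hc2)]
              simp
            · rw [if_neg (by omega : ¬ (row ≤ i ∨ col ≤ j + 1)),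
                  if_neg (by omega : ¬ (row ≤ i + 1 ∨ col ≤ j))]
              simp
          refine ⟨?_, ?_⟩
          · rw [if_neg h2]; exact hres
          · simp only [hres]
            refine InvD_set row col b _ i.toNat j.toNat ?_ I2
            have hl2 : ((solveA (i + 1) j (solveA i (j + 1) dp row col (k - (i + 1))).2 row col (k - (j + 1))).2.length : Int) = row := I2.1
            omega

-- ===== VERDICT (by name: the statement is the Claim_ definition above) =====
theorem solve_spec : Claim_equal_solve := by
  intro i j dp row col k _ hpre
  unfold Spec_solve solve solve_alt
  rcases hpre with hout | ⟨hi, hj, hlen, hrows⟩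
  · rw [solveA]
    have hne : ¬ (i = row - 1 ∧ j = col - 1 ∧ k = 0) := by omega
    simp [hne, hout]
  · have hinv : InvD row col (decide (k = row * col - (i + 1) * (j + 1))) dp := by
      refine ⟨hlen, ?_⟩
      intro r hr
      obtain ⟨h1, h2⟩ := hrows r hr
      exact ⟨h1, fun v hv => Or.inl (h2 v hv)⟩
    obtain ⟨hr, _⟩ := solveA_main row col (decide (k = row * col - (i + 1) * (j + 1)))
      ((row - i).toNat + (col - j).toNat) i j dp k le_rfl hi hj hinv rfl
    rw [hr]
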